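-- pv_equiv track=rewrite | github.com/dinhnamit06/tool-ki-m-key-youtube | core/video_to_text_fetcher.py | _extract_json_blob
-- ===== SOURCE A (Python) =====
-- from typing import Dict, List, Optional, Tuple
--
-- def _extract_json_blob(page_html: str, marker: str) -> Optional[str]:
--     marker_index = str(page_html or "").find(marker)
--     if marker_index < 0:
--         return None
--
--     start = page_html.find("{", marker_index)
--     if start < 0:
--         return None
--
--     depth = 0
--     in_string = False
--     escaped = False
--     for idx in range(start, len(page_html)):
--         ch = page_html[idx]
--         if in_string:
--             if escaped:
--                 escaped = False
--             elif ch == "\\":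
--                 escaped = True
--             elif ch == '"':
--                 in_string = False
--             continue
--         if ch == '"':
--             in_string = True
--             continue
--         if ch == "{":
--             depth += 1
--             continue
--         if ch == "}":
--             depth -= 1
--             if depth == 0:
--                 return page_html[start : idx + 1]
--     return None
-- ===== SOURCE B (Python) =====
-- def _extract_json_blob(page_html, marker):
--     marker_index = page_html.find(marker)
--     if marker_index < 0:
--         return None
--     start = page_html.find("{", marker_index)
--     if start < 0:
--         return None
--     depth = 0
--     i = start
--     while True:
--         # jump straight to the next structurally interesting character
--         cands = [p for p in (page_html.find(c, i) for c in '{}"') if p >= 0]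
--         if not cands:
--             return None
--         p = min(cands)
--         ch = page_html[p]
--         if ch == '{':
--             depth += 1
--             i = p + 1
--         elif ch == '}':
--             depth -= 1
--             if depth == 0:
--                 return page_html[start:p + 1]
--             i = p + 1
--         else:
--             # skip the whole string literal: the closing quote is the next
--             # quote preceded by an even number of consecutive backslashes
--             j = p + 1
--             while True:
--                 q = page_html.find('"', j)
--                 if q < 0:
--                     return None
--                 b = q - 1
--                 while b >= j and page_html[b] == '\\':
--                     b -= 1
--                 if (q - 1 - b) % 2 == 0:
--                     i = q + 1
--                     break
--                 j = q + 1
-- ===== Notes on version B (the rewrite author's own statement) =====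
-- stated objective: alternative
-- what changed: Replaces A's character-by-character state machine (depth/in_string/escaped flags over every char) with a jump scanner: str.find is used to leap directly to the next '{', '}' or '"', and a quoted string is skipped by finding the next quote and testing the parity of the run of backslashes immediately before it, instead of simulating the escape flag.
import Mathlib
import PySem

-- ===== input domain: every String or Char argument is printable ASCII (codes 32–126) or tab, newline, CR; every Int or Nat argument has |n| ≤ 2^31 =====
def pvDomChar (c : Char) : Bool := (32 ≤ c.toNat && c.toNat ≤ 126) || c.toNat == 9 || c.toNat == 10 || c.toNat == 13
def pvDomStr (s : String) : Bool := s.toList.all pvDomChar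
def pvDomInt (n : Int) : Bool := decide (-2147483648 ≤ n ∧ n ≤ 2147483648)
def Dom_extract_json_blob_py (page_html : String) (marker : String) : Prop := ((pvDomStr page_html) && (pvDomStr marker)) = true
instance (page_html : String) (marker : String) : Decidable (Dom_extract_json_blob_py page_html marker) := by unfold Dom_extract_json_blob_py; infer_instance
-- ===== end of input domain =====

-- B replaces A's per-character state machine (depth/in_string/escaped flags) with a jump
-- scanner: str.find leaps to the next '{', '}' or '"', and a quoted string is skipped by
-- finding the next quote and testing the parity of the backslash run before it (alternative
-- decomposition, same asymptotic cost).

-- ===== PORT A =====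
-- A's for-loop over range(start, len) as structural recursion over the suffix,
-- carrying the running index and A's exact state (depth, in_string, escaped).
def pvLoopA (s : List Char) (st : Nat) : Nat → List Char → Int → Bool → Bool → Option String
  | _, [], _, _, _ => none
  | idx, ch :: rest, depth, instr, esc =>
    if instr then
      if esc then pvLoopA s st (idx+1) rest depth true false
      else if ch = '\\' then pvLoopA s st (idx+1) rest depth true true
      else if ch = '"' then pvLoopA s st (idx+1) rest depth false false
      else pvLoopA s st (idx+1) rest depth true false
    else if ch = '"' then pvLoopA s st (idx+1) rest depth true false
    else if ch = '{' then pvLoopA s st (idx+1) rest (depth+1) false false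
    else if ch = '}' then
      if depth - 1 = 0 then some (String.ofList (PySem.List.slice s (some (st:Int)) (some ((idx:Int)+1))))
      else pvLoopA s st (idx+1) rest (depth-1) false false
    else pvLoopA s st (idx+1) rest depth false false

def extract_json_blob_py (page_html : String) (marker : String) : Option String :=
  let s := page_html.toList
  -- `str(page_html or "")` : for a str argument this is page_html itself (empty or not)
  let base := if s = [] then ([] : List Char) else s
  let marker_index := PySem.Chars.find base marker.toList
  if marker_index < 0 then none
  else
    let start := PySem.Chars.findFrom s ['{'] marker_index none
    if start < 0 then none
    else pvLoopA s start.toNat start.toNat (s.drop start.toNat) 0 false false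

-- ===== PORT B =====
-- Source B's inner backslash-run loop: `while b >= j and page_html[b] == '\\\\': b -= 1`,
-- structurally recursive on a fuel that exactly covers the walked range.
def pvCountBackF (s : List Char) (j : Nat) : Nat → Int → Int
  | 0, b => b
  | f+1, b =>
    if (j:Int) ≤ b ∧ PySem.List.pyGetD s b ' ' = '\\' then pvCountBackF s j f (b-1) else b

def pvCountBack (s : List Char) (j : Nat) (b : Int) : Int :=
  pvCountBackF s j ((b + 1 - (j:Int)).toNat) b

-- Source B's middle loop: find the closing quote (next quote preceded by an even backslash run);
-- returns the index just past it, or none if the string literal never closes.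
-- Fuel s.length + 2 is enough: the scan index strictly grows and stays ≤ s.length.
def pvSkipStrF (s : List Char) : Nat → Nat → Option Nat
  | 0, _ => none
  | f+1, j =>
    if PySem.Chars.findFrom s ['"'] (j:Int) none < 0 then none
    else if PySem.Int.mod (PySem.Chars.findFrom s ['"'] (j:Int) none - 1
        - pvCountBack s j (PySem.Chars.findFrom s ['"'] (j:Int) none - 1)) 2 = 0 then
      some ((PySem.Chars.findFrom s ['"'] (j:Int) none).toNat + 1)
    else pvSkipStrF s f ((PySem.Chars.findFrom s ['"'] (j:Int) none).toNat + 1)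

def pvSkipStr (s : List Char) (j : Nat) : Option Nat := pvSkipStrF s (s.length + 2) j

-- the candidate list `[find('{',i), find('}',i), find('"',i)]` filtered to hits, and its min
def pvMinCand (s : List Char) (i : Nat) : Option Int :=
  PySem.List.min? ([PySem.Chars.findFrom s ['{'] (i:Int) none,
                PySem.Chars.findFrom s ['}'] (i:Int) none,
                PySem.Chars.findFrom s ['"'] (i:Int) none].filter (fun p => decide (0 ≤ p)))
        (fun x => x)

-- Source B's outer while-loop: leap with find to the next structural character.
-- Same fuel argument: the index strictly grows and stays ≤ s.length.
def pvLoopBF (s : List Char) (st : Nat) : Nat → Int → Nat → Option String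
  | 0, _, _ => none
  | f+1, depth, i =>
    match pvMinCand s i with
    | none => none   -- `if not cands: return None`
    | some p =>
      if PySem.List.pyGetD s p ' ' = '{' then pvLoopBF s st f (depth+1) (p.toNat+1)
      else if PySem.List.pyGetD s p ' ' = '}' then
        if depth - 1 = 0 then some (String.ofList (PySem.List.slice s (some (st:Int)) (some (p+1))))
        else pvLoopBF s st f (depth-1) (p.toNat+1)
      else
        match pvSkipStr s (p.toNat+1) with
        | none => none
        | some i' => pvLoopBF s st f depth i'

def pvLoopB (s : List Char) (st : Nat) (depth : Int) (i : Nat) : Option String :=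
  pvLoopBF s st (s.length + 2) depth i

def extract_json_blob_py_alt (page_html : String) (marker : String) : Option String :=
  let s := page_html.toList
  let marker_index := PySem.Chars.find s marker.toList
  if marker_index < 0 then none
  else
    let start := PySem.Chars.findFrom s ['{'] marker_index none
    if start < 0 then none
    else pvLoopB s start.toNat 0 start.toNat

-- ===== PRECONDITION & SPEC =====
def Spec_extract_json_blob_py (page_html : String) (marker : String) (out : Option String) : Prop := out = extract_json_blob_py_alt page_html marker
instance (page_html : String) (marker : String) (out : Option String) : Decidable (Spec_extract_json_blob_py page_html marker out) := by unfold Spec_extract_json_blob_py; infer_instance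

-- ===== CLAIM (what is proved, stated in full; the proofs are below) =====
def Claim_equal_extract_json_blob_py : Prop := ∀ (page_html : String) (marker : String), Dom_extract_json_blob_py page_html marker → Spec_extract_json_blob_py page_html marker (extract_json_blob_py page_html marker)

-- ===== LEMMAS AND PROOFS =====

-- The index of the first occurrence of c at or after j, directly as a recursion.
def pvNextIdx (s : List Char) (c : Char) (j : Nat) : Int :=
  if h : j < s.length then (if s[j] = c then (j:Int) else pvNextIdx s c (j+1)) else -1
termination_by s.length - j

-- find's value is determined by the first-occurrence specification.
theorem pvFind_eq_of_first (l sub : List Char) (m : Nat) (hm : sub <+: l.drop m)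
    (hmin : ∀ i < m, ¬ sub <+: l.drop i) : PySem.Chars.find l sub = (m : Int) := by
  have hinf : sub <:+: l := by
    rcases hm with ⟨t, ht⟩
    exact ⟨l.take m, t, by rw [List.append_assoc, ht]; exact List.take_append_drop m l⟩
  have hne : PySem.Chars.find l sub ≠ -1 := (PySem.Chars.find_ne_neg_one_iff l sub).mpr hinf
  have hnn : 0 ≤ PySem.Chars.find l sub := by
    have := PySem.Chars.neg_one_le_find l sub
    omega
  obtain ⟨hat, hfirst⟩ := PySem.Chars.find_spec hnn
  have : (PySem.Chars.find l sub).toNat = m := by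
    by_contra hneq
    rcases Nat.lt_or_ge (PySem.Chars.find l sub).toNat m with hlt | hge
    · exact hmin _ hlt hat
    · exact hfirst m (by omega) hm
  omega

theorem pvNextIdx_shift (s : List Char) (c : Char) (j : Nat) (hj : j < s.length)
    (hne : s[j] ≠ c) : pvNextIdx s c j = pvNextIdx s c (j+1) := by
  rw [pvNextIdx]; simp [hj, hne]


theorem pvNextIdx_self (s : List Char) (c : Char) (j : Nat) (hj : j < s.length)
    (he : s[j] = c) : pvNextIdx s c j = (j:Int) := by
  rw [pvNextIdx]; simp [hj, he]


theorem pvNextIdx_none (s : List Char) (c : Char) (j : Nat) (hj : s.length ≤ j) :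
    pvNextIdx s c j = -1 := by
  rw [pvNextIdx]; simp [Nat.not_lt.mpr hj]


theorem pvFindCharCons (x : Char) (xs : List Char) (c : Char) :
    PySem.Chars.find (x::xs) [c] = if x = c then 0 else
      (if PySem.Chars.find xs [c] = -1 then -1 else PySem.Chars.find xs [c] + 1) := by
  by_cases hx : x = c
  · subst hx
    rw [if_pos rfl]
    exact pvFind_eq_of_first (x::xs) [x] 0 (by rw [List.drop_zero]; exact ⟨xs, rfl⟩)
      (fun i hi => absurd hi (Nat.not_lt_zero i))
  · simp only [if_neg hx]
    by_cases h1 : PySem.Chars.find xs [c] = -1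
    · simp only [if_pos h1]
      rw [PySem.Chars.find_eq_neg_one_iff] at h1 ⊢
      intro hinf
      rw [List.singleton_infix_iff] at h1 hinf
      rcases List.mem_cons.mp hinf with h | h
      · exact hx h.symm
      · exact h1 h
    · simp only [if_neg h1]
      have hnn : 0 ≤ PySem.Chars.find xs [c] := by
        have := PySem.Chars.neg_one_le_find xs [c]; omega
      obtain ⟨hat, hfirst⟩ := PySem.Chars.find_spec hnn
      have hres := pvFind_eq_of_first (x::xs) [c] ((PySem.Chars.find xs [c]).toNat + 1)
        (by rw [List.drop_succ_cons]; exact hat)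
        (by intro i hi
            cases i with
            | zero =>
              intro hpre
              rcases List.cons_prefix_cons.mp hpre with ⟨he, -⟩
              exact hx he.symm
            | succ i' =>
              rw [List.drop_succ_cons]
              exact hfirst i' (by omega))
      rw [hres]
      push_cast
      omega

theorem pvFF_eq_nextIdx (s : List Char) (c : Char) (j : Nat) :
    PySem.Chars.findFrom s [c] (j:Int) none = pvNextIdx s c j := by
  by_cases hj : j < s.length
  · rw [PySem.Chars.findFrom_natCast s [c] j (le_of_lt hj)]
    have hd : s.drop j = s[j] :: s.drop (j+1) := List.drop_eq_getElem_cons hj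
    rw [hd, pvFindCharCons]
    by_cases hc : s[j] = c
    · rw [pvNextIdx_self s c j hj hc]
      simp [hc]
    · rw [pvNextIdx_shift s c j hj hc, ← pvFF_eq_nextIdx s c (j+1)]
      rw [PySem.Chars.findFrom_natCast s [c] (j+1) (by omega)]
      simp only [if_neg hc]
      have hb := PySem.Chars.neg_one_le_find (s.drop (j+1)) [c]
      split_ifs <;> omega
  · rw [pvNextIdx_none s c j (by omega)]
    by_cases hj2 : j = s.length
    · subst hj2
      rw [PySem.Chars.findFrom_natCast s [c] s.length (le_refl _)]
      have h0 : PySem.Chars.find ([] : List Char) [c] = -1 := by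
        rw [PySem.Chars.find_eq_neg_one_iff]
        simp
      simp [List.drop_length, h0]
    · simp [PySem.Chars.findFrom]
      omega
termination_by s.length - j

theorem pvNextIdx_spec (s : List Char) (c : Char) (j : Nat) :
    pvNextIdx s c j = -1 ∨ ((j:Int) ≤ pvNextIdx s c j ∧ pvNextIdx s c j < s.length ∧
      ∃ h : (pvNextIdx s c j).toNat < s.length, s[(pvNextIdx s c j).toNat] = c) := by
  rw [pvNextIdx]
  split
  · rename_i h
    split
    · rename_i he
      right
      refine ⟨le_refl _, by exact_mod_cast h, by simpa using h, by simpa using he⟩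
    · rcases pvNextIdx_spec s c (j+1) with h1 | ⟨h1, h2, h3, h4⟩
      · exact Or.inl h1
      · exact Or.inr ⟨by omega, h2, h3, h4⟩
  · exact Or.inl rfl
termination_by s.length - j

-- find(c, j) for a single character c either fails (-1) or yields an index in [j, len)
theorem pvFindCharBounds (s : List Char) (c : Char) (j : Nat) :
    PySem.Chars.findFrom s [c] (j:Int) none = -1 ∨
      ((j:Int) ≤ PySem.Chars.findFrom s [c] (j:Int) none ∧
        PySem.Chars.findFrom s [c] (j:Int) none < s.length) := by
  rw [pvFF_eq_nextIdx]
  rcases pvNextIdx_spec s c j with h | ⟨h1, h2, -⟩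
  · exact Or.inl h
  · exact Or.inr ⟨h1, h2⟩

-- unfold equations for the backslash-run loop
theorem pvCountBack_step (s : List Char) (j : Nat) (b : Int)
    (h : (j:Int) ≤ b ∧ PySem.List.pyGetD s b ' ' = '\\') :
    pvCountBack s j b = pvCountBack s j (b-1) := by
  have h1 : (b + 1 - (j:Int)).toNat = (b - (j:Int)).toNat + 1 := by omega
  unfold pvCountBack
  rw [h1, pvCountBackF, if_pos h]
  congr 1
  omega

theorem pvCountBack_stop (s : List Char) (j : Nat) (b : Int)
    (h : ¬((j:Int) ≤ b ∧ PySem.List.pyGetD s b ' ' = '\\')) :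
    pvCountBack s j b = b := by
  unfold pvCountBack
  rcases hf : (b + 1 - (j:Int)).toNat with _ | f
  · rfl
  · rw [pvCountBackF, if_neg h]

-- shifting the run loop's lower fence past a non-backslash character changes nothing
theorem pvCB_shift (s : List Char) (j : Nat) (hj : j < s.length) (hne : s[j] ≠ '\\')
    (b : Int) : pvCountBack s j b = pvCountBack s (j+1) b := by
  by_cases hwb : PySem.List.pyGetD s b ' ' = '\\'
  · by_cases hb : (j:Int) + 1 ≤ b
    · rw [pvCountBack_step s j b ⟨by omega, hwb⟩,
          pvCountBack_step s (j+1) b ⟨by exact_mod_cast hb, hwb⟩]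
      exact pvCB_shift s j hj hne (b-1)
    · by_cases hb2 : (j:Int) ≤ b
      · -- b = j, but s[j] is not a backslash: contradiction with hwb
        have hbj : b = (j:Int) := by omega
        rw [hbj, PySem.List.pyGetD_eq_getElem s ' ' (by omega) (by exact_mod_cast hj)] at hwb
        simp at hwb
        exact absurd hwb hne
      · rw [pvCountBack_stop s j b (by intro hc; exact hb2 hc.1),
            pvCountBack_stop s (j+1) b (by intro hc; omega)]
  · rw [pvCountBack_stop s j b (by intro hc; exact hwb hc.2),
        pvCountBack_stop s (j+1) b (by intro hc; exact hwb hc.2)]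
termination_by (b + 1 - j).toNat
decreasing_by omega

-- shifting the fence past a backslash: the landing points agree, or are j-1 vs j+1 (parity kept)
theorem pvCB_bs (s : List Char) (j : Nat) (hj : j < s.length) (hyes : s[j] = '\\')
    (b : Int) (hb : (j:Int) + 1 ≤ b) :
      pvCountBack s j b = pvCountBack s (j+2) b ∨
        (pvCountBack s j b = (j:Int) - 1 ∧ pvCountBack s (j+2) b = (j:Int) + 1) := by
  by_cases hwb : PySem.List.pyGetD s b ' ' = '\\'
  · by_cases hb2 : (j:Int) + 2 ≤ b
    · rw [pvCountBack_step s j b ⟨by omega, hwb⟩,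
          pvCountBack_step s (j+2) b ⟨by exact_mod_cast hb2, hwb⟩]
      exact pvCB_bs s j hj hyes (b-1) (by omega)
    · -- b = j+1 and s[j+1] is a backslash: left side walks down to j-1, right stops at j+1
      have hbj : b = (j:Int) + 1 := by omega
      right
      constructor
      · rw [pvCountBack_step s j b ⟨by omega, hwb⟩, hbj]
        have hgj : PySem.List.pyGetD s ((j:Int)+1-1) ' ' = '\\' := by
          have : (j:Int) + 1 - 1 = (j:Int) := by omega
          rw [this, PySem.List.pyGetD_eq_getElem s ' ' (by omega) (by exact_mod_cast hj)]
          simpa using hyes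
        rw [pvCountBack_step s j ((j:Int)+1-1) ⟨by omega, hgj⟩]
        rw [pvCountBack_stop s j ((j:Int)+1-1-1) (by intro hc; omega)]
        omega
      · rw [pvCountBack_stop s (j+2) b (by intro hc; omega), hbj]
  · rw [pvCountBack_stop s j b (by intro hc; exact hwb hc.2),
        pvCountBack_stop s (j+2) b (by intro hc; exact hwb hc.2)]
    exact Or.inl rfl
termination_by (b - j).toNat
decreasing_by omega

-- the middle loop's fuel is irrelevant once it covers the remaining range
theorem pvSkipF_fuel (s : List Char) (f f' j : Nat)
    (h1 : s.length + 1 - j ≤ f) (h2 : s.length + 1 - j ≤ f') :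
    pvSkipStrF s f j = pvSkipStrF s f' j := by
  induction f generalizing f' j with
  | zero =>
    cases f' with
    | zero => rfl
    | succ g =>
      rw [pvSkipStrF, pvSkipStrF,
          if_pos (by rw [pvFF_eq_nextIdx, pvNextIdx_none s '"' j (by omega)]; norm_num)]
  | succ g ih =>
    cases f' with
    | zero =>
      rw [pvSkipStrF, pvSkipStrF,
          if_pos (by rw [pvFF_eq_nextIdx, pvNextIdx_none s '"' j (by omega)]; norm_num)]
    | succ g' =>
      rw [pvSkipStrF, pvSkipStrF]
      by_cases hq : PySem.Chars.findFrom s ['"'] (j:Int) none < 0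
      · rw [if_pos hq, if_pos hq]
      · rw [if_neg hq, if_neg hq]
        by_cases hm : PySem.Int.mod (PySem.Chars.findFrom s ['"'] (j:Int) none - 1
            - pvCountBack s j (PySem.Chars.findFrom s ['"'] (j:Int) none - 1)) 2 = 0
        · rw [if_pos hm, if_pos hm]
        · rw [if_neg hm, if_neg hm]
          rcases pvFindCharBounds s '"' j with h | h
          · omega
          · exact ih _ _ (by omega) (by omega)

theorem pvSkipF_ge (s : List Char) (f : Nat) :
    ∀ j i', pvSkipStrF s f j = some i' → j ≤ i' := by
  induction f with
  | zero => intro j i' h; exact absurd h (by simp [pvSkipStrF])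
  | succ g ih =>
    intro j i' h
    rw [pvSkipStrF] at h
    split at h
    · exact absurd h (by simp)
    · rename_i hq
      rcases pvFindCharBounds s '"' j with hf | hf
      · omega
      · split at h
        · have := Option.some.inj h
          omega
        · have := ih _ _ h
          omega

theorem pvSkipStr_ge (s : List Char) (j : Nat) :
    ∀ i', pvSkipStr s j = some i' → j ≤ i' := fun i' h => pvSkipF_ge s _ j i' h

-- pvSkipStr unfolded one iteration, with find rewritten to pvNextIdx
theorem pvSkipStr_eq (s : List Char) (j : Nat) : pvSkipStr s j =
    if pvNextIdx s '"' j < 0 then none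
    else if PySem.Int.mod (pvNextIdx s '"' j - 1 - pvCountBack s j (pvNextIdx s '"' j - 1)) 2 = 0
      then some ((pvNextIdx s '"' j).toNat + 1)
      else pvSkipStr s ((pvNextIdx s '"' j).toNat + 1) := by
  unfold pvSkipStr
  rw [show s.length + 2 = (s.length + 1) + 1 from rfl, pvSkipStrF]
  simp only [pvFF_eq_nextIdx]
  by_cases hq : pvNextIdx s '"' j < 0
  · rw [if_pos hq, if_pos hq]
  · rw [if_neg hq, if_neg hq]
    by_cases hm : PySem.Int.mod (pvNextIdx s '"' j - 1
        - pvCountBack s j (pvNextIdx s '"' j - 1)) 2 = 0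
    · rw [if_pos hm, if_pos hm]
    · rw [if_neg hm, if_neg hm]
      exact pvSkipF_fuel s (s.length + 1) (s.length + 1 + 1) _ (by omega) (by omega)

theorem pvSkip_none (s : List Char) (j : Nat) (hj : s.length ≤ j) : pvSkipStr s j = none := by
  rw [pvSkipStr_eq, pvNextIdx_none s '"' j hj]
  norm_num

theorem pvSkip_close (s : List Char) (j : Nat) (hj : j < s.length) (h : s[j] = '"') :
    pvSkipStr s j = some (j+1) := by
  rw [pvSkipStr_eq, pvNextIdx_self s '"' j hj h]
  rw [pvCountBack_stop s j ((j:Int) - 1) (by intro hc; omega)]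
  have h0 : (j:Int) - 1 - ((j:Int) - 1) = 0 := by omega
  rw [h0]
  norm_num [PySem.Int.mod_eq_emod_of_pos]

theorem pvSkip_shift (s : List Char) (j : Nat) (hj : j < s.length)
    (hq : s[j] ≠ '"') (hb : s[j] ≠ '\\') :
    pvSkipStr s j = pvSkipStr s (j+1) := by
  rw [pvSkipStr_eq s j, pvSkipStr_eq s (j+1), pvNextIdx_shift s '"' j hj hq,
      pvCB_shift s j hj hb]

theorem pvSkip_bs (s : List Char) (j : Nat) (hj1 : j + 1 < s.length) (hbs : s[j] = '\\') :
    pvSkipStr s j = pvSkipStr s (j+2) := by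
  have hj : j < s.length := by omega
  have hq : s[j] ≠ '"' := by rw [hbs]; decide
  by_cases hq1 : s[j+1] = '"'
  · -- the very next char is an escaped quote: both sides continue the hunt from j+2
    rw [pvSkipStr_eq s j, pvNextIdx_shift s '"' j hj hq, pvNextIdx_self s '"' (j+1) hj1 hq1]
    rw [if_neg (by omega)]
    have hc1 : ((j+1:Nat):Int) - 1 = (j:Int) := by push_cast; omega
    rw [hc1]
    have hcb : pvCountBack s j ((j:Int)) = (j:Int) - 1 := by
      rw [pvCountBack_step s j (j:Int) ⟨le_refl _,
            by rw [PySem.List.pyGetD_eq_getElem s ' ' (by omega) (by exact_mod_cast hj)];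
               simpa using hbs⟩,
          pvCountBack_stop s j ((j:Int) - 1) (by intro hc; omega)]
    rw [hcb]
    have h1 : (j:Int) - ((j:Int) - 1) = 1 := by omega
    rw [h1, if_neg (by rw [PySem.Int.mod_eq_emod_of_pos (by norm_num)]; norm_num)]
    have h2 : (((j+1:Nat):Int)).toNat + 1 = j + 2 := by simp
    rw [h2]
  · rw [pvSkipStr_eq s j, pvSkipStr_eq s (j+2), pvNextIdx_shift s '"' j hj hq,
        pvNextIdx_shift s '"' (j+1) hj1 hq1]
    rcases pvNextIdx_spec s '"' (j+2) with h | ⟨hge, hlt, hT, hat⟩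
    · rw [h]; norm_num
    · have hq0 : ¬ pvNextIdx s '"' (j+2) < 0 := by omega
      rw [if_neg hq0, if_neg hq0]
      rcases pvCB_bs s j hj hbs (pvNextIdx s '"' (j+2) - 1) (by omega) with he | ⟨h1, h2⟩
      · rw [he]
      · rw [h1, h2]
        have hm : PySem.Int.mod (pvNextIdx s '"' (j+2) - 1 - ((j:Int) - 1)) 2
               = PySem.Int.mod (pvNextIdx s '"' (j+2) - 1 - ((j:Int) + 1)) 2 := by
          rw [PySem.Int.mod_eq_emod_of_pos (by norm_num), PySem.Int.mod_eq_emod_of_pos (by norm_num)]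
          omega
        rw [hm]

-- the minimum candidate: none past the end, fixed under skipping a plain character,
-- and i itself when s[i] is structural
theorem pvMinCand_none (s : List Char) (i : Nat) (hj : s.length ≤ i) :
    pvMinCand s i = none := by
  unfold pvMinCand
  simp only [pvFF_eq_nextIdx, pvNextIdx_none s _ i hj]
  rfl

theorem pvMinCand_shift (s : List Char) (i : Nat) (hj : i < s.length)
    (h1 : s[i] ≠ '{') (h2 : s[i] ≠ '}') (h3 : s[i] ≠ '"') :
    pvMinCand s i = pvMinCand s (i+1) := by
  unfold pvMinCand
  simp only [pvFF_eq_nextIdx, pvNextIdx_shift s '{' i hj h1, pvNextIdx_shift s '}' i hj h2,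
    pvNextIdx_shift s '"' i hj h3]

theorem pvMin3_le (a b c m : Int)
    (h : PySem.List.min? ([a,b,c].filter (fun p => decide (0 ≤ p))) (fun x => x) = some m) :
    ∀ y ∈ [a,b,c].filter (fun p => decide (0 ≤ p)), m ≤ y := by
  by_cases h1 : 0 ≤ a <;> by_cases h2 : 0 ≤ b <;> by_cases h3 : 0 ≤ c <;>
    simp [PySem.List.min?, h1, h2, h3] at h ⊢ <;>
    (try split_ifs at h) <;> (try simp only [] at h) <;> (try split_ifs at h) <;>
    (try simp only [Option.some_inj] at h) <;> omega

theorem pvFFCases (s : List Char) (c : Char) (i : Nat) (hj : i < s.length) :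
    PySem.Chars.findFrom s [c] (i:Int) none = (i:Int) ∨
    PySem.Chars.findFrom s [c] (i:Int) none = -1 ∨
    (i:Int) < PySem.Chars.findFrom s [c] (i:Int) none := by
  rw [pvFF_eq_nextIdx]
  by_cases hc : s[i] = c
  · exact Or.inl (pvNextIdx_self s c i hj hc)
  · rw [pvNextIdx_shift s c i hj hc]
    rcases pvNextIdx_spec s c (i+1) with h | ⟨h1, -, -⟩
    · exact Or.inr (Or.inl h)
    · exact Or.inr (Or.inr (by omega))

theorem pvMinCand_self (s : List Char) (i : Nat) (hj : i < s.length)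
    (hset : s[i] = '{' ∨ s[i] = '}' ∨ s[i] = '"') : pvMinCand s i = some (i:Int) := by
  have hmemi : (i:Int) ∈ ([PySem.Chars.findFrom s ['{'] (i:Int) none,
      PySem.Chars.findFrom s ['}'] (i:Int) none,
      PySem.Chars.findFrom s ['"'] (i:Int) none].filter (fun p => decide (0 ≤ p))) := by
    rw [List.mem_filter]
    refine ⟨?_, by simp⟩
    rcases hset with h | h | h <;>
      simp [pvNextIdx_self s _ i hj h, pvFF_eq_nextIdx]
  rcases hm0 : pvMinCand s i with _ | m
  · unfold pvMinCand at hm0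
    rw [PySem.List.min?_eq_none_iff] at hm0
    rw [hm0] at hmemi
    simp at hmemi
  · have hmem := PySem.List.min?_mem (by rw [← pvMinCand]; exact hm0)
    have hle : ∀ y ∈ ([PySem.Chars.findFrom s ['{'] (i:Int) none,
        PySem.Chars.findFrom s ['}'] (i:Int) none,
        PySem.Chars.findFrom s ['"'] (i:Int) none].filter (fun p => decide (0 ≤ p))), m ≤ y := by
      have hm0' := hm0
      unfold pvMinCand at hm0'
      exact pvMin3_le _ _ _ m hm0'
    have h1 : m ≤ (i:Int) := hle _ hmemi
    rw [List.mem_filter] at hmem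
    obtain ⟨h3, h0⟩ := hmem
    have h0' : (0:Int) ≤ m := by simpa using h0
    simp only [List.mem_cons, List.not_mem_nil, or_false] at h3
    have hge : (i:Int) ≤ m := by
      rcases h3 with h | h | h
      · rcases pvFFCases s '{' i hj with hf | hf | hf <;> omega
      · rcases pvFFCases s '}' i hj with hf | hf | hf <;> omega
      · rcases pvFFCases s '"' i hj with hf | hf | hf <;> omega
    exact congrArg some (by omega)

-- the minimum of the found candidates is an index in [i, len)
theorem pvMinCandBounds (s : List Char) (i : Nat) (p : Int)
    (hm : pvMinCand s i = some p) : (i:Int) ≤ p ∧ p < s.length := by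
  have hmem := PySem.List.min?_mem hm
  rw [List.mem_filter] at hmem
  obtain ⟨hp3, hp0⟩ := hmem
  have hp0' : (0:Int) ≤ p := by simpa using hp0
  simp only [List.mem_cons, List.not_mem_nil, or_false] at hp3
  rcases hp3 with h | h | h
  · rcases pvFindCharBounds s '{' i with hf | hf <;> (rw [h]; omega)
  · rcases pvFindCharBounds s '}' i with hf | hf <;> (rw [h]; omega)
  · rcases pvFindCharBounds s '"' i with hf | hf <;> (rw [h]; omega)

-- the outer loop's fuel is irrelevant once it covers the remaining range
theorem pvLoopBF_fuel (s : List Char) (st : Nat) (f f' : Nat) (d : Int) (i : Nat)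
    (h1 : s.length + 1 - i ≤ f) (h2 : s.length + 1 - i ≤ f') :
    pvLoopBF s st f d i = pvLoopBF s st f' d i := by
  induction f generalizing f' d i with
  | zero =>
    cases f' with
    | zero => rfl
    | succ g => rw [pvLoopBF, pvLoopBF, pvMinCand_none s i (by omega)]
  | succ g ih =>
    cases f' with
    | zero => rw [pvLoopBF, pvLoopBF, pvMinCand_none s i (by omega)]
    | succ g' =>
      rw [pvLoopBF, pvLoopBF]
      rcases hM : pvMinCand s i with _ | p
      · rfl
      · have hb := pvMinCandBounds s i p hM
        dsimp only
        by_cases hg1 : PySem.List.pyGetD s p ' ' = '{'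
        · rw [if_pos hg1, if_pos hg1]
          exact ih _ _ _ (by omega) (by omega)
        · rw [if_neg hg1, if_neg hg1]
          by_cases hg2 : PySem.List.pyGetD s p ' ' = '}'
          · rw [if_pos hg2, if_pos hg2]
            by_cases hd0 : d - 1 = 0
            · rw [if_pos hd0, if_pos hd0]
            · rw [if_neg hd0, if_neg hd0]
              exact ih _ _ _ (by omega) (by omega)
          · rw [if_neg hg2, if_neg hg2]
            rcases hS : pvSkipStr s (p.toNat + 1) with _ | i'
            · rfl
            · have := pvSkipStr_ge s (p.toNat + 1) i' hS
              dsimp only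
              exact ih _ _ _ (by omega) (by omega)

-- evaluation lemmas for pvLoopB given its candidate minimum
theorem pvLoopB_none (s : List Char) (st : Nat) (d : Int) (i : Nat)
    (h : pvMinCand s i = none) : pvLoopB s st d i = none := by
  unfold pvLoopB
  rw [show s.length + 2 = (s.length + 1) + 1 from rfl, pvLoopBF, h]

theorem pvLoopB_open (s : List Char) (st : Nat) (d : Int) (i : Nat) (p : Int)
    (h : pvMinCand s i = some p) (hg : PySem.List.pyGetD s p ' ' = '{') :
    pvLoopB s st d i = pvLoopB s st (d+1) (p.toNat+1) := by
  unfold pvLoopB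
  rw [show s.length + 2 = (s.length + 1) + 1 from rfl, pvLoopBF, h]
  dsimp only
  rw [if_pos hg]
  exact pvLoopBF_fuel s st _ _ _ _ (by omega) (by omega)

theorem pvLoopB_close (s : List Char) (st : Nat) (d : Int) (i : Nat) (p : Int)
    (h : pvMinCand s i = some p) (hg : PySem.List.pyGetD s p ' ' = '}') :
    pvLoopB s st d i =
      (if d - 1 = 0 then some (String.ofList (PySem.List.slice s (some (st:Int)) (some (p+1))))
       else pvLoopB s st (d-1) (p.toNat+1)) := by
  unfold pvLoopB
  rw [show s.length + 2 = (s.length + 1) + 1 from rfl, pvLoopBF, h]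
  dsimp only
  rw [if_neg (by rw [hg]; decide), if_pos hg]
  by_cases hd0 : d - 1 = 0
  · rw [if_pos hd0, if_pos hd0]
  · rw [if_neg hd0, if_neg hd0]
    exact pvLoopBF_fuel s st _ _ _ _ (by omega) (by omega)

theorem pvLoopB_other (s : List Char) (st : Nat) (d : Int) (i : Nat) (p : Int)
    (h : pvMinCand s i = some p) (hg1 : PySem.List.pyGetD s p ' ' ≠ '{')
    (hg2 : PySem.List.pyGetD s p ' ' ≠ '}') :
    pvLoopB s st d i =
      (match pvSkipStr s (p.toNat+1) with
       | none => none
       | some i' => pvLoopB s st d i') := by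
  unfold pvLoopB
  rw [show s.length + 2 = (s.length + 1) + 1 from rfl, pvLoopBF, h]
  dsimp only
  rw [if_neg hg1, if_neg hg2]
  rcases hS : pvSkipStr s (p.toNat + 1) with _ | i'
  · rfl
  · dsimp only
    exact pvLoopBF_fuel s st _ _ _ _ (by omega) (by omega)

theorem pvLoopB_congr (s : List Char) (st : Nat) (d : Int) (i i' : Nat)
    (h : pvMinCand s i = pvMinCand s i') : pvLoopB s st d i = pvLoopB s st d i' := by
  rcases hM : pvMinCand s i' with _ | p
  · rw [pvLoopB_none s st d i (h.trans hM), pvLoopB_none s st d i' hM]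
  · have hMi : pvMinCand s i = some p := h.trans hM
    by_cases hg1 : PySem.List.pyGetD s p ' ' = '{'
    · rw [pvLoopB_open s st d i p hMi hg1, pvLoopB_open s st d i' p hM hg1]
    · by_cases hg2 : PySem.List.pyGetD s p ' ' = '}'
      · rw [pvLoopB_close s st d i p hMi hg2, pvLoopB_close s st d i' p hM hg2]
      · rw [pvLoopB_other s st d i p hMi hg1 hg2, pvLoopB_other s st d i' p hM hg1 hg2]

-- joint loop invariant: A's scan out of a string equals B's jumps; A's scan inside a
-- string equals B resumed after the skip
theorem pvLoop_eq (s : List Char) (st : Nat) :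
    ∀ k : Nat,
      (∀ i d, s.length - i < k →
        pvLoopA s st i (s.drop i) d false false = pvLoopB s st d i) ∧
      (∀ j d, s.length - j < k →
        pvLoopA s st j (s.drop j) d true false =
          (match pvSkipStr s j with
           | none => none
           | some i' => pvLoopB s st d i')) := by
  intro k
  induction k with
  | zero => exact ⟨fun i d h => absurd h (by omega), fun j d h => absurd h (by omega)⟩
  | succ k ih =>
    have hget : ∀ (i : Nat) (c : Char) (hi : i < s.length), s[i]'hi = c →
        PySem.List.pyGetD s ((i:Nat):Int) ' ' = c := by
      intro i c hi hc
      have h1 : ((i:Nat):Int) < (s.length:Int) := by exact_mod_cast hi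
      rw [PySem.List.pyGetD_eq_getElem s ' ' (by omega) h1]
      simpa using hc
    constructor
    · intro i d hk
      by_cases h : i < s.length
      · rw [List.drop_eq_getElem_cons h, pvLoopA]
        by_cases hq : s[i] = '"'
        · rw [pvLoopB_other s st d i (i:Int) (pvMinCand_self s i h (Or.inr (Or.inr hq)))
              (by rw [hget i '"' h hq]; decide) (by rw [hget i '"' h hq]; decide)]
          simp only [Int.toNat_natCast]
          have hA := ih.2 (i+1) d (by omega)
          simp [hq]
          exact hA
        · by_cases ho : s[i] = '{'
          · rw [pvLoopB_open s st d i (i:Int) (pvMinCand_self s i h (Or.inl ho))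
                (hget i '{' h ho)]
            simp only [Int.toNat_natCast]
            have hA := ih.1 (i+1) (d+1) (by omega)
            simp [ho]
            exact hA
          · by_cases hc : s[i] = '}'
            · rw [pvLoopB_close s st d i (i:Int) (pvMinCand_self s i h (Or.inr (Or.inl hc)))
                  (hget i '}' h hc)]
              simp only [Int.toNat_natCast]
              by_cases hd0 : d - 1 = 0
              · simp [hc, hd0]
              · have hA := ih.1 (i+1) (d-1) (by omega)
                simp [hc, hd0]
                exact hA
            · rw [pvLoopB_congr s st d i (i+1) (pvMinCand_shift s i h ho hc hq)]
              have hA := ih.1 (i+1) d (by omega)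
              simp [hq, ho, hc]
              exact hA
      · have hd : s.drop i = [] := List.drop_eq_nil_of_le (by omega)
        rw [hd, pvLoopA, pvLoopB_none s st d i (pvMinCand_none s i (by omega))]
    · intro j d hk
      by_cases h : j < s.length
      · rw [List.drop_eq_getElem_cons h, pvLoopA]
        by_cases hb : s[j] = '\\'
        · by_cases h2 : j + 1 < s.length
          · rw [pvSkip_bs s j h2 hb]
            have hA := ih.2 (j+2) d (by omega)
            simp [hb]
            rw [List.drop_eq_getElem_cons h2, pvLoopA]
            simp
            exact hA
          · have hnone : pvSkipStr s j = none := by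
              rw [pvSkipStr_eq, pvNextIdx_shift s '"' j h (by rw [hb]; decide),
                  pvNextIdx_none s '"' (j+1) (by omega), if_pos (by norm_num)]
            rw [hnone]
            have hd2 : s.drop (j+1) = [] := List.drop_eq_nil_of_le (by omega)
            rw [hd2]
            simp [hb, pvLoopA]
        · by_cases hq : s[j] = '"'
          · rw [pvSkip_close s j h hq]
            have hA := ih.1 (j+1) d (by omega)
            simp [hq]
            exact hA
          · rw [pvSkip_shift s j h hq hb]
            have hA := ih.2 (j+1) d (by omega)
            simp [hq, hb]
            exact hA
      · have hd : s.drop j = [] := List.drop_eq_nil_of_le (by omega)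
        rw [hd, pvLoopA, pvSkip_none s j (by omega)]

-- ===== VERDICT (by name: the statement is the Claim_ definition above) =====
theorem extract_json_blob_py_spec : Claim_equal_extract_json_blob_py := by
  intro page_html marker _
  unfold Spec_extract_json_blob_py extract_json_blob_py extract_json_blob_py_alt
  dsimp only
  have hbase : (if page_html.toList = [] then ([] : List Char) else page_html.toList)
      = page_html.toList := by split <;> simp_all
  rw [hbase]
  split
  · rfl
  · split
    · rfl
    · exact (pvLoop_eq page_html.toList _ (page_html.toList.length + 1)).1 _ 0 (by omega)
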